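-- pv_equiv track=rewrite | github.com/aa-blinov/self-hosted-search-agent | search_agent/infrastructure/intelligence.py | _normalize_citation_groups
-- ===== SOURCE A (Python) =====
-- def _normalize_citation_groups(answer: str) -> str:
--     text = answer or ""
--     normalized: list[str] = []
--     index = 0
--     while index < len(text):
--         if text[index] != "[":
--             normalized.append(text[index])
--             index += 1
--             continue
--         end = text.find("]", index + 1)
--         if end == -1:
--             normalized.append(text[index])
--             index += 1
--             continue
--         content = text[index + 1:end]
--         values: list[str] = []
--         current = ""
--         valid = True
--         for ch in content:
--             if ch.isdigit():
--                 current += ch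
--                 continue
--             if ch in {",", ";", " "}:
--                 if current:
--                     values.append(current)
--                     current = ""
--                 continue
--             valid = False
--             break
--         if current:
--             values.append(current)
--         if valid and len(values) > 1:
--             normalized.extend(f"[{value}]" for value in values)
--         else:
--             normalized.append(text[index : end + 1])
--         index = end + 1
--     return "".join(normalized)
-- ===== SOURCE B (Python) =====
-- def _normalize_citation_groups(answer: str) -> str:
--     """One-pass state machine: stream chars, buffering an open bracket group."""
--     out = []
--     group = None  # chars of the currently open bracket group, or None
--     for ch in (answer or ""):
--         if group is None:
--             if ch == "[":
--                 group = []
--             else: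
--                 out.append(ch)
--         elif ch == "]":
--             values = _parse_values(group)
--             if values is not None and len(values) > 1:
--                 out.append("".join("[" + v + "]" for v in values))
--             else:
--                 out.append("[" + "".join(group) + "]")
--             group = None
--         else:
--             group.append(ch)
--     if group is not None:
--         # unterminated group: emit verbatim
--         out.append("[")
--         out.extend(group)
--     return "".join(out)
--
--
-- def _parse_values(content):
--     """Digit runs of content, or None if any char besides digits and ',;' ' ' appears."""
--     values = []
--     current = ""
--     for ch in content:
--         if ch.isdigit():
--             current += ch
--         elif ch in ",; ":
--             if current:
--                 values.append(current)
--                 current = ""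
--         else:
--             return None
--     if current:
--         values.append(current)
--     return values
-- ===== Notes on version B (the rewrite author's own statement) =====
-- stated objective: alternative
-- what changed: Replaces A's index-based while loop with str.find and slicing by a single forward state machine that streams characters, buffering the chars of an open bracket group and emitting the group when it closes (or verbatim at end of input).
import Mathlib
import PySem

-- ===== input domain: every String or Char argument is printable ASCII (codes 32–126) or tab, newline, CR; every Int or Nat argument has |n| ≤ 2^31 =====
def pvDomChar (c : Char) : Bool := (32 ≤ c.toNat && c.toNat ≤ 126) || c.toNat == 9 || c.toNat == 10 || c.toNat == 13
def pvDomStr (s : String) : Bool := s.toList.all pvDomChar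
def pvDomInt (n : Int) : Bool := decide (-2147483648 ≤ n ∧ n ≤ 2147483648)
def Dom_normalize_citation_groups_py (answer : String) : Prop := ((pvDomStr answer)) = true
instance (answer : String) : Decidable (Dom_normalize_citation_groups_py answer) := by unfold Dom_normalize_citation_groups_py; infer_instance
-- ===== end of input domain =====

-- B is an 'alternative': a single forward state machine buffering the open bracket group,
-- instead of A's index loop with str.find and slicing. Return-value equivalence only (no mutation involved).

-- Python str.isdigit() on a single char: exact on the ASCII domain (Dom), where it is '0'..'9'.
def pyDigit (c : Char) : Bool := decide ('0' ≤ c) && decide (c ≤ '9')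

-- ===== PORT A =====
-- A's inner 'for ch in content' loop (with its break): returns (values, current, valid).
def parseA : List Char → List (List Char) → List Char → (List (List Char) × List Char × Bool)
  | [], values, current => (values, current, true)
  | c :: cs, values, current =>
    if pyDigit c then parseA cs values (current ++ [c])
    else if c = ',' ∨ c = ';' ∨ c = ' ' then
      if current ≠ [] then parseA cs (values ++ [current]) [] else parseA cs values current
    else (values, current, false)

-- A's while loop over the remaining suffix of text (text.find("]", index+1) = find in the suffix
-- after the '['; the slices text[index+1:end] / text[index:end+1] are takes of that suffix).
def loopA : List Char → List (List Char) → List (List Char)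
  | [], acc => acc
  | c :: rest, acc =>
    if c ≠ '[' then loopA rest (acc ++ [[c]])
    else
      let e := PySem.Chars.find rest [']']
      if e = -1 then loopA rest (acc ++ [[c]])
      else
        let content := rest.take e.toNat
        let r := parseA content [] []
        let values := if r.2.1 ≠ [] then r.1 ++ [r.2.1] else r.1
        if r.2.2 ∧ values.length > 1 then
          loopA (rest.drop (e.toNat + 1)) (acc ++ values.map (fun v => '[' :: (v ++ [']'])))
        else
          loopA (rest.drop (e.toNat + 1)) (acc ++ ['[' :: rest.take (e.toNat + 1)])
  termination_by cs _ => cs.length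
  decreasing_by
    all_goals simp [List.length_drop]
    all_goals omega

def normalize_citation_groups_py (answer : String) : String :=
  String.ofList (loopA answer.toList []).flatten

-- ===== PORT B =====
-- B's helper _parse_values: digit runs, or none on any other char.
def parseB : List Char → List (List Char) → List Char → Option (List (List Char))
  | [], values, current => some (if current ≠ [] then values ++ [current] else values)
  | c :: cs, values, current =>
    if pyDigit c then parseB cs values (current ++ [c])
    else if [',', ';', ' '].contains c then
      if current ≠ [] then parseB cs (values ++ [current]) [] else parseB cs values current
    else none

-- emission for a closed group (the ']' branch of B's loop)
def emitB (g : List Char) : List Char :=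
  match parseB g [] [] with
  | some values =>
      if values.length > 1 then (values.map (fun v => '[' :: (v ++ [']']))).flatten
      else '[' :: (g ++ [']'])
  | none => '[' :: (g ++ [']'])

-- one step of B's state machine; state = (out, open group or none)
def stepB (st : List (List Char) × Option (List Char)) (ch : Char) :
    List (List Char) × Option (List Char) :=
  match st.2 with
  | none => if ch = '[' then (st.1, some []) else (st.1 ++ [[ch]], none)
  | some g => if ch = ']' then (st.1 ++ [emitB g], none) else (st.1, some (g ++ [ch]))

def normalize_citation_groups_py_alt (answer : String) : String :=
  let st := answer.toList.foldl stepB ([], none)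
  let out := match st.2 with
    | none => st.1
    | some g => st.1 ++ [['[']] ++ g.map (fun c => [c])
  String.ofList out.flatten

-- ===== PRECONDITION & SPEC =====
def Spec_normalize_citation_groups_py (answer : String) (out : String) : Prop := out = normalize_citation_groups_py_alt answer
instance (answer : String) (out : String) : Decidable (Spec_normalize_citation_groups_py answer out) := by unfold Spec_normalize_citation_groups_py; infer_instance

-- ===== CLAIM (what is proved, stated in full; the proofs are below) =====
def Claim_equal_normalize_citation_groups_py : Prop := ∀ (answer : String), Dom_normalize_citation_groups_py answer → Spec_normalize_citation_groups_py answer (normalize_citation_groups_py answer)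

-- ===== LEMMAS AND PROOFS =====

-- B's final output chunks for a whole input, starting in the closed state
def outB (cs : List Char) : List (List Char) :=
  let st := cs.foldl stepB ([], none)
  match st.2 with
  | none => st.1
  | some g => st.1 ++ [['[']] ++ g.map (fun c => [c])

set_option maxRecDepth 8192 in
theorem parse_rel (cs : List Char) : ∀ values current,
    parseB cs values current =
      (let r := parseA cs values current
       if r.2.2 then some (if r.2.1 ≠ [] then r.1 ++ [r.2.1] else r.1) else none) := by
  induction cs with
  | nil => intro values current; simp [parseA, parseB]
  | cons c cs ih =>
    intro values current
    simp only [parseA, parseB]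
    by_cases hd : pyDigit c
    · simp only [hd, ite_true, if_true]
      exact ih values (current ++ [c])
    · have hct : ([',', ';', ' '].contains c) = decide (c = ',' ∨ c = ';' ∨ c = ' ') := by
        simp [List.contains_eq_mem]
      by_cases hs : c = ',' ∨ c = ';' ∨ c = ' '
      · by_cases hcur : current = []
        · simp only [hd, hs, hct, hcur, if_true, if_false, decide_true, ne_eq,
            not_true_eq_false, ite_false, ite_true, ih]
          simp
        · simp only [hd, hs, hct, hcur, if_true, if_false, decide_true, ne_eq,
            not_false_eq_true, ite_true, ite_false, ih]
          simp [hcur]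
      · simp only [hd, hs, hct, if_false, decide_false]
        simp [hs]

-- out is a pure accumulator of B's fold
theorem foldl_stepB_out (cs : List Char) : ∀ out g,
    cs.foldl stepB (out, g) =
      (out ++ (cs.foldl stepB ([], g)).1, (cs.foldl stepB ([], g)).2) := by
  induction cs with
  | nil => intro out g; simp
  | cons c cs ih =>
    intro out g
    simp only [List.foldl_cons]
    cases g with
    | none =>
      by_cases h : c = '['
      · rw [show stepB (out, none) c = (out, some []) by simp [stepB, h],
            show stepB (([] : List (List Char)), none) c = ([], some []) by simp [stepB, h]]
        exact ih out (some [])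
      · rw [show stepB (out, none) c = (out ++ [[c]], none) by simp [stepB, h],
            show stepB (([] : List (List Char)), none) c = ([[c]], none) by simp [stepB, h],
            ih (out ++ [[c]]) none, ih [[c]] none]
        simp
    | some g =>
      by_cases h : c = ']'
      · rw [show stepB (out, some g) c = (out ++ [emitB g], none) by simp [stepB, h],
            show stepB (([] : List (List Char)), some g) c = ([emitB g], none) by simp [stepB, h],
            ih (out ++ [emitB g]) none, ih [emitB g] none]
        simp
      · rw [show stepB (out, some g) c = (out, some (g ++ [c])) by simp [stepB, h],
            show stepB (([] : List (List Char)), some g) c = ([], some (g ++ [c])) by simp [stepB, h]]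
        exact ih out (some (g ++ [c]))

-- in group mode, ']'-free input is buffered verbatim
theorem foldl_stepB_group (cs : List Char) (h : ']' ∉ cs) : ∀ g,
    cs.foldl stepB ([], some g) = ([], some (g ++ cs)) := by
  induction cs with
  | nil => intro g; simp
  | cons c cs ih =>
    intro g
    have hc : c ≠ ']' := fun hc => h (hc ▸ List.mem_cons_self)
    have hcs : ']' ∉ cs := fun hm => h (List.mem_cons_of_mem _ hm)
    simp [stepB, hc, ih hcs]

theorem singleton_infix {a : Char} {l : List Char} : [a] <:+: l ↔ a ∈ l := by
  constructor
  · intro h; exact h.sublist.subset (List.mem_singleton_self a)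
  · intro h
    obtain ⟨s, t, rfl⟩ := List.append_of_mem h
    exact ⟨s, t, by simp⟩

-- A on a ']'-free suffix copies it char by char
theorem loopA_no_close (cs : List Char) (h : ']' ∉ cs) : ∀ acc,
    loopA cs acc = acc ++ cs.map (fun c => [c]) := by
  induction cs with
  | nil => intro acc; simp [loopA]
  | cons c cs ih =>
    intro acc
    have hc : c ≠ ']' := fun hc => h (hc ▸ List.mem_cons_self)
    have hcs : ']' ∉ cs := fun hm => h (List.mem_cons_of_mem _ hm)
    rw [loopA]
    by_cases hb : c = '['
    · have hfind : PySem.Chars.find cs [']'] = -1 := by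
        rw [PySem.Chars.find_eq_neg_one_iff, singleton_infix]; exact hcs
      simp [hb, hfind, ih hcs]
    · simp [hb, ih hcs]

-- decompose at the first ']' that find points to
theorem find_close (rest : List Char) (e : Int) (he : PySem.Chars.find rest [']'] = e)
    (hne : e ≠ -1) :
    e.toNat < rest.length ∧ rest = rest.take e.toNat ++ ']' :: rest.drop (e.toNat + 1) ∧
      ']' ∉ rest.take e.toNat := by
  have h0 : 0 ≤ PySem.Chars.find rest [']'] := by
    have := PySem.Chars.neg_one_le_find rest [']']
    omega
  obtain ⟨hpre, hmin⟩ := PySem.Chars.find_spec (s := rest) (sub := [']']) h0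
  rw [he] at hpre hmin
  obtain ⟨t, ht⟩ := hpre
  simp only [List.singleton_append] at ht
  have hk : e.toNat < rest.length := by
    by_contra h
    rw [List.drop_eq_nil_iff.mpr (by omega)] at ht
    simp at ht
  have hdrop : rest.drop (e.toNat + 1) = t := by
    have h1 : rest.drop (e.toNat + 1) = (rest.drop e.toNat).drop 1 := by
      rw [List.drop_drop, Nat.add_comm]
    rw [h1, ← ht]
    rfl
  refine ⟨hk, ?_, ?_⟩
  · conv_lhs => rw [← List.take_append_drop e.toNat rest]
    rw [← ht, hdrop]
  · intro hmem
    obtain ⟨i, hi, hget⟩ := List.getElem_of_mem hmem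
    have hilt : i < e.toNat := by
      have := hi; simp at this; omega
    have hir : i < rest.length := by omega
    rw [List.getElem_take] at hget
    refine hmin i hilt ⟨rest.drop (i + 1), ?_⟩
    rw [List.singleton_append, ← hget, List.getElem_cons_drop]

-- main invariant (fuel form): A's loop = accumulated out ++ B's output, at flatten level
theorem loopA_eq_outB_aux : ∀ (n : Nat) (cs : List Char), cs.length ≤ n → ∀ acc,
    (loopA cs acc).flatten = acc.flatten ++ (outB cs).flatten := by
  intro n
  induction n with
  | zero =>
    intro cs hcs acc
    have hnil : cs = [] := List.eq_nil_of_length_eq_zero (Nat.le_zero.mp hcs)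
    subst hnil
    simp [loopA, outB]
  | succ n ih =>
    intro cs hcs acc
    match cs with
    | [] => simp [loopA, outB]
    | c :: rest =>
      have hlen : rest.length ≤ n := by simp at hcs; omega
      by_cases hc : c = '['
      · subst hc
        rw [loopA]
        simp only [ne_eq, not_true_eq_false, if_false, ite_false]
        by_cases he : PySem.Chars.find rest [']'] = -1
        · rw [if_pos he]
          have hnc : ']' ∉ rest := by
            rw [← singleton_infix]
            exact (PySem.Chars.find_eq_neg_one_iff rest [']']).mp he
          rw [loopA_no_close rest hnc]
          have houtB : outB ('[' :: rest) = [['[']] ++ rest.map (fun c => [c]) := by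
            unfold outB
            rw [List.foldl_cons,
              show stepB (([] : List (List Char)), none) '[' = ([], some []) from rfl,
              foldl_stepB_group rest hnc []]
            simp
          rw [houtB]
          simp
        · rw [if_neg he]
          obtain ⟨hk, hsplit, hnc⟩ := find_close rest (PySem.Chars.find rest [']']) rfl he
          set k := (PySem.Chars.find rest [']']).toNat with hkdef
          set content := rest.take k with hcdef
          set rest' := rest.drop (k + 1) with hrdef
          have hcl : content.length = k := by
            rw [hcdef]; simp [List.length_take]; omega
          have hlen' : rest'.length ≤ n := by
            rw [hrdef]; simp [List.length_drop]; omega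
          have houtB : (outB ('[' :: rest)).flatten =
              emitB content ++ (outB rest').flatten := by
            unfold outB
            rw [List.foldl_cons,
              show stepB (([] : List (List Char)), none) '[' = ([], some []) from rfl]
            conv_lhs => rw [hsplit]
            rw [List.foldl_append, foldl_stepB_group _ hnc [], List.foldl_cons]
            simp only [List.nil_append]
            rw [show stepB (([] : List (List Char)), some content) ']' =
                ([emitB content], none) from rfl]
            rw [foldl_stepB_out _ _ none]
            cases hY : (rest'.foldl stepB ([], none)).2 <;> simp [hY]
          have htake1 : rest.take (k + 1) = content ++ [']'] := by
            conv_lhs => rw [hsplit]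
            rw [List.take_append, List.take_of_length_le (by rw [hcl]; omega), hcl,
              Nat.add_sub_cancel_left]
            rfl
          by_cases hv : (parseA content [] []).2.2 ∧
              (if (parseA content [] []).2.1 ≠ [] then
                  (parseA content [] []).1 ++ [(parseA content [] []).2.1]
                else (parseA content [] []).1).length > 1
          · rw [if_pos hv, ih _ hlen', houtB]
            have hemit2 : emitB content =
                ((if (parseA content [] []).2.1 ≠ [] then
                      (parseA content [] []).1 ++ [(parseA content [] []).2.1]
                    else (parseA content [] []).1).map
                  (fun v => '[' :: (v ++ [']']))).flatten := by
              unfold emitB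
              rw [parse_rel]
              simp only [hv.1, if_true]
              rw [if_pos hv.2]
            rw [hemit2]
            simp
          · rw [if_neg hv, ih _ hlen', houtB]
            have hemit : emitB content = '[' :: rest.take (k + 1) := by
              unfold emitB
              rw [parse_rel]
              by_cases hvb : (parseA content [] []).2.2
              · simp only [hvb, if_true]
                rw [if_neg (fun hq => hv ⟨hvb, hq⟩), htake1]
              · simp only [hvb, Bool.false_eq_true, if_false]
                rw [htake1]
            rw [hemit]
            simp
      · rw [loopA]
        rw [if_pos hc, ih rest hlen]
        have houtB : outB (c :: rest) = [[c]] ++ outB rest := by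
          unfold outB
          rw [List.foldl_cons,
            show stepB (([] : List (List Char)), none) c = ([[c]], none) by simp [stepB, hc],
            foldl_stepB_out rest [[c]] none]
          cases hY : (rest.foldl stepB ([], none)).2 <;> simp [hY]
        rw [houtB]
        simp

theorem loopA_eq_outB (cs : List Char) : ∀ acc,
    (loopA cs acc).flatten = acc.flatten ++ (outB cs).flatten :=
  loopA_eq_outB_aux cs.length cs le_rfl

theorem normalize_citation_groups_py_spec : Claim_equal_normalize_citation_groups_py := by
  intro answer _
  unfold Spec_normalize_citation_groups_py
  unfold normalize_citation_groups_py normalize_citation_groups_py_alt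
  have h := loopA_eq_outB answer.toList []
  simp only [List.flatten_nil, List.nil_append] at h
  exact congrArg String.ofList (h.trans (by rfl))
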